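-- pv_equiv track=rewrite | github.com/pratheekdhananjaya/CS580_Project | Q5.py | solve
-- ===== SOURCE A (Python) =====
-- import collections
--
-- def solve(relations):
--     chain = [list(r) for r in relations]
--     numberOfRelations = len(chain)
--
--     for i in range(numberOfRelations - 2, -1, -1):
--         rightRelation = chain[i + 1]
--         validKeys = set(r[0] for r in rightRelation)
--
--         chain[i] = [r for r in chain[i] if r[1] in validKeys]
--
--     currentResult = chain[0]
--     for i in range(1, numberOfRelations):
--         nextResult = chain[i]
--         idx = collections.defaultdict(list)
--         for r in nextResult:
--             idx[r[0]].append(r)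
--
--         newResult = []
--         for tup in currentResult:
--             key = tup[-1]
--             if key in idx:
--                 for match in idx[key]:
--                     newResult.append(tup + (match[1],))
--         currentResult = newResult
--
--     return currentResult
-- ===== SOURCE B (Python) =====
-- def solve(relations):
--     # Per-relation hash index + depth-first expansion; no backward semi-join pass
--     # (forward matching already drops non-joining tuples).
--     indexes = []
--     for rel in relations[1:]:
--         idx = {}
--         for r in rel:
--             idx.setdefault(r[0], []).append(r[1])
--         indexes.append(idx)
--
--     out = []
--
--     def dfs(tup, depth):
--         if depth == len(indexes):
--             out.append(tup)
--             return
--         for b in indexes[depth].get(tup[-1], ()):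
--             dfs(tup + (b,), depth + 1)
--
--     for t in relations[0]:
--         dfs(t, 0)
--     return out
-- ===== Notes on version B (the rewrite author's own statement) =====
-- stated objective: alternative
-- what changed: Replaces A's backward semi-join prefilter plus level-by-level defaultdict join with a single forward pass: one hash index per relation built once, then depth-first recursive expansion of each starting tuple (the semi-join pass is dropped since forward matching discards non-joining tuples).
import Mathlib
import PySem

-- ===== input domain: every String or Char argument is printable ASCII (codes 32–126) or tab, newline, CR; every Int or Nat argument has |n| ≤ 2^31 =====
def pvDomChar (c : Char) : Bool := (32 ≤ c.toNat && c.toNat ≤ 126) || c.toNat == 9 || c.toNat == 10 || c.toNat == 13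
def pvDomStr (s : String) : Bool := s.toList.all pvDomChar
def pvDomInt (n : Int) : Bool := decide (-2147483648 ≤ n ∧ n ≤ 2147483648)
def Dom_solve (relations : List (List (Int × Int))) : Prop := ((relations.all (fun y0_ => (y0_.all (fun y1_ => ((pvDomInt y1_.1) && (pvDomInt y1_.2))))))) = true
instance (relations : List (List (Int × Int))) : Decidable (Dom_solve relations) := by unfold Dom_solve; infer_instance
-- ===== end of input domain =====

-- B drops A's backward semi-join pass and joins by DFS over per-relation hash indexes; return values proved equal on nonempty input (both raise IndexError on []).

-- ===== PORT A =====
-- a tuple of ints is modelled as List Int; a pair-tuple (a, b) becomes [a, b]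
def pvPairRow (p : Int × Int) : List Int := [p.1, p.2]

-- A's backward loop 'for i in range(n-2,-1,-1): chain[i] = filter by keys of chain[i+1]'
-- as the structural recursion it performs: chain[i+1] is already updated when chain[i] is filtered.
def pvSemiPass : List (List (Int × Int)) → List (List (Int × Int))
  | [] => []
  | [r] => [r]
  | r :: rest =>
    let rest' := pvSemiPass rest
    let validKeys : PySem.Set Int := PySem.Set.ofList ((rest'.headD []).map Prod.fst)
    (r.filter (fun p => PySem.Set.contains validKeys p.2)) :: rest'

def solve (relations : List (List (Int × Int))) : List (List Int) :=
  let chain := relations.map (fun r => r)      -- chain = [list(r) for r in relations]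
  let chain2 := pvSemiPass chain
  -- currentResult = chain[0]; chain[0] raises IndexError on [], excluded by Pre_solve
  let current := (chain2.headD []).map pvPairRow
  chain2.tail.foldl (fun cur rel =>
    -- idx = defaultdict(list); for r in rel: idx[r[0]].append(r)
    let idx := rel.foldl (fun d p => d.modify p.1 [] (fun l => l ++ [p])) PySem.Dict.empty
    cur.foldl (fun acc tup =>
      let key := tup.getLastD 0                -- tup[-1]; tup is always nonempty
      if idx.contains key then acc ++ (idx.getD key []).map (fun m => tup ++ [m.2]) else acc) []) current

-- ===== PORT B =====
-- idx = {}; for r in rel: idx.setdefault(r[0], []).append(r[1])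
def pvBuildIdx (rel : List (Int × Int)) : PySem.Dict Int (List Int) :=
  rel.foldl (fun d p => d.modify p.1 [] (fun l => l ++ [p.2])) PySem.Dict.empty

-- dfs(tup, depth): emit tup at the chain end, else extend by every match of tup[-1]
def pvDfs : List (PySem.Dict Int (List Int)) → List Int → List (List Int)
  | [], tup => [tup]
  | d :: rest, tup => (d.getD (tup.getLastD 0) []).flatMap (fun b => pvDfs rest (tup ++ [b]))

def solve_alt (relations : List (List (Int × Int))) : List (List Int) :=
  match relations with
  | [] => []                                   -- relations[0] raises IndexError here, excluded by Pre_solve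
  | r0 :: rest =>
    let idxs := rest.map pvBuildIdx
    r0.flatMap (fun t => pvDfs idxs [t.1, t.2])

-- ===== PRECONDITION & SPEC =====
-- Pre_ excludes only the empty list, on which A (and B) raise IndexError at relations[0].
def Pre_solve (relations : List (List (Int × Int))) : Prop := relations ≠ []
instance (relations : List (List (Int × Int))) : Decidable (Pre_solve relations) := by unfold Pre_solve; infer_instance
def pvWitness_solve : (List (List (Int × Int))) := [[(1, 2), (1, 3)], [(2, 5)]]

def Spec_solve (relations : List (List (Int × Int))) (out : List (List Int)) : Prop := out = solve_alt relations
instance (relations : List (List (Int × Int))) (out : List (List Int)) : Decidable (Spec_solve relations out) := by unfold Spec_solve; infer_instance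

-- ===== CLAIM (what is proved, stated in full; the proofs are below) =====
def Claim_equal_solve : Prop := ∀ (relations : List (List (Int × Int))), Dom_solve relations → Pre_solve relations → Spec_solve relations (solve relations)

-- ===== LEMMAS AND PROOFS =====

-- reference join: DFS over the raw relations (no index, no filtering)
def dfsR : List (List (Int × Int)) → List Int → List (List Int)
  | [], tup => [tup]
  | r :: rest, tup =>
    (r.filter (fun p => p.1 == tup.getLastD 0)).flatMap (fun m => dfsR rest (tup ++ [m.2]))

-- whether key k starts a complete chain through rels
def matched : List (List (Int × Int)) → Int → Bool
  | [], _ => true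
  | r :: rest, k => r.any (fun p => p.1 == k && matched rest p.2)

-- closed form of A's backward pass
def matchedChain : List (List (Int × Int)) → List (List (Int × Int))
  | [] => []
  | r :: rest => r.filter (fun p => matched rest p.2) :: matchedChain rest

-- dropping, from a flatMap, filtered-out elements whose image is empty
theorem flatMap_filter_eq {α β : Type} (l : List α) (q : α → Bool) (g : α → List β)
    (h : ∀ m ∈ l, q m = false → g m = []) : (l.filter q).flatMap g = l.flatMap g := by
  induction l with
  | nil => rfl
  | cons a t ih =>
    have ih' := ih (fun m hm => h m (List.mem_cons_of_mem a hm))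
    by_cases hq : q a = true
    · simp [hq, ih']
    · simp only [Bool.not_eq_true] at hq
      simp [hq, ih', h a (List.mem_cons_self) hq]

theorem contains_filter_map_fst (l : List (Int × Int)) (q : Int × Int → Bool) (x : Int) :
    ((l.filter q).map Prod.fst).contains x = l.any (fun p => p.1 == x && q p) := by
  rw [Bool.eq_iff_iff]
  simp only [List.contains_eq_mem, decide_eq_true_eq, List.mem_map, List.mem_filter,
    List.any_eq_true, Bool.and_eq_true, beq_iff_eq]
  constructor
  · rintro ⟨p, ⟨hp, hqp⟩, rfl⟩; exact ⟨p, hp, rfl, hqp⟩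
  · rintro ⟨p, hp, h1, hqp⟩; exact ⟨p, ⟨hp, hqp⟩, h1⟩

theorem getLastD_concat' (tup : List Int) (b : Int) : (tup ++ [b]).getLastD 0 = b := by
  simp

-- A's defaultdict grouping loop: lookup returns exactly the tuples with first component c
theorem getD_idxA (rel : List (Int × Int)) (c : Int) :
    ((rel.foldl (fun d p => d.modify p.1 [] (fun l => l ++ [p])) PySem.Dict.empty).getD c [])
      = rel.filter (fun p => p.1 == c) := by
  have hmap : rel.foldl (fun d p => d.modify p.1 [] (fun l => l ++ [p])) PySem.Dict.empty
      = (rel.map (fun p => (p.1, p))).foldl (fun d q => d.modify q.1 [] (fun l => l ++ [q.2])) PySem.Dict.empty := by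
    rw [List.foldl_map]
  rw [hmap, PySem.Dict.getD_foldl_modify_append]
  simp [List.filter_map, Function.comp_def]

-- keys of A's grouping dict
theorem contains_idxA (rel : List (Int × Int)) (c : Int) :
    (rel.foldl (fun d p => d.modify p.1 [] (fun l => l ++ [p])) PySem.Dict.empty).contains c
      = (rel.map Prod.fst).contains c := by
  have h := PySem.Dict.keys_foldl_modify_key (l := rel) (key := Prod.fst) (d0 := ([] : List (Int × Int)))
      (f := fun _ p => (fun l => l ++ [p])) (d := PySem.Dict.empty)
  rw [PySem.Dict.contains_eq_decide_mem_keys, h, List.contains_eq_mem, decide_eq_decide]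
  simp [PySem.Dict.keys_empty, PySem.Set.update_nil_left, PySem.Set.mem_ofList]

-- the inner loop of A's forward pass, as a flatMap over the current result
theorem inner_eq (rel : List (Int × Int)) (cur : List (List Int)) :
    (cur.foldl (fun acc tup =>
      if (rel.foldl (fun d p => d.modify p.1 [] (fun l => l ++ [p])) PySem.Dict.empty).contains (tup.getLastD 0) then
        acc ++ ((rel.foldl (fun d p => d.modify p.1 [] (fun l => l ++ [p])) PySem.Dict.empty).getD (tup.getLastD 0) []).map (fun m => tup ++ [m.2])
      else acc) [])
    = cur.flatMap (fun tup => (rel.filter (fun p => p.1 == tup.getLastD 0)).map (fun m => tup ++ [m.2])) := by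
  have hstep : ∀ (acc : List (List Int)) (tup : List Int), tup ∈ cur →
      (if (rel.foldl (fun d p => d.modify p.1 [] (fun l => l ++ [p])) PySem.Dict.empty).contains (tup.getLastD 0) then
        acc ++ ((rel.foldl (fun d p => d.modify p.1 [] (fun l => l ++ [p])) PySem.Dict.empty).getD (tup.getLastD 0) []).map (fun m => tup ++ [m.2])
      else acc)
      = acc ++ ((rel.filter (fun p => p.1 == tup.getLastD 0)).map (fun m => tup ++ [m.2])) := by
    intro acc tup _
    cases hc : (rel.foldl (fun d p => d.modify p.1 [] (fun l => l ++ [p])) PySem.Dict.empty).contains (tup.getLastD 0) with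
    | true => rw [if_pos rfl, getD_idxA]
    | false =>
      rw [if_neg (by simp)]
      have hfil : rel.filter (fun p => p.1 == tup.getLastD 0) = [] := by
        rw [contains_idxA, List.contains_eq_mem] at hc
        rw [List.filter_eq_nil_iff]
        intro p hp
        simp only [beq_iff_eq]
        intro hcontra
        exact (by simpa using hc : ¬ _) (List.mem_map.mpr ⟨p, hp, hcontra⟩)
      rw [hfil]
      simp
  refine Eq.trans (PySem.List.foldl_congr_mem cur _ _ [] hstep) ?_
  rw [PySem.List.foldl_append_eq_flatMap]
  rfl

-- A's forward fold of join steps is a DFS from each current tuple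
theorem foldl_join_eq_dfsR (rels : List (List (Int × Int))) :
    ∀ cur : List (List Int),
    rels.foldl (fun cur rel => cur.flatMap (fun tup =>
        (rel.filter (fun p => p.1 == tup.getLastD 0)).map (fun m => tup ++ [m.2]))) cur
      = cur.flatMap (fun t => dfsR rels t) := by
  induction rels with
  | nil => intro cur; simp [dfsR]
  | cons r rest ih =>
    intro cur
    simp only [List.foldl_cons, ih, List.flatMap_assoc]
    apply List.flatMap_congr
    intro tup _
    rw [List.flatMap_map]
    rfl

-- A's backward pass computes the matched-chain filter
theorem semiPass_eq : ∀ rels, pvSemiPass rels = matchedChain rels := by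
  intro rels
  induction rels with
  | nil => rfl
  | cons r rest ih =>
    cases rest with
    | nil => simp [pvSemiPass, matchedChain, matched]
    | cons r2 rest2 =>
      simp only [pvSemiPass, ih, matchedChain]
      congr 1
      apply List.filter_congr
      intro p _
      -- membership in set(first components of the already-filtered next relation) is 'matched'
      have hset : ∀ (l : List Int) (x : Int),
          PySem.Set.contains (PySem.Set.ofList l) x = l.contains x := by
        intro l x
        simp [PySem.Set.contains, PySem.Set.mem_ofList, List.contains_eq_mem]
      simp only [List.headD_cons, hset, contains_filter_map_fst]
      rfl

-- an unmatched key yields no rows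
theorem dfsR_nil_of_not_matched : ∀ (rels : List (List (Int × Int))) (tup : List Int),
    matched rels (tup.getLastD 0) = false → dfsR rels tup = [] := by
  intro rels
  induction rels with
  | nil => intro tup h; simp [matched] at h
  | cons r rest ih =>
    intro tup h
    simp only [matched, List.any_eq_false, Bool.and_eq_true, beq_iff_eq, not_and] at h
    simp only [dfsR, List.flatMap_eq_nil_iff]
    intro m hm
    rw [List.mem_filter, beq_iff_eq] at hm
    apply ih
    rw [getLastD_concat']
    simpa using h m hm.1 hm.2

-- the semi-join filter does not change the DFS result
theorem dfsR_matchedChain : ∀ (rels : List (List (Int × Int))) (tup : List Int),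
    dfsR (matchedChain rels) tup = dfsR rels tup := by
  intro rels
  induction rels with
  | nil => intro tup; rfl
  | cons r rest ih =>
    intro tup
    simp only [matchedChain, dfsR]
    have hcong : ∀ m ∈ ((r.filter (fun p => matched rest p.2)).filter (fun p => p.1 == tup.getLastD 0)),
        dfsR (matchedChain rest) (tup ++ [m.2]) = dfsR rest (tup ++ [m.2]) := by
      intro m _; exact ih (tup ++ [m.2])
    rw [List.flatMap_congr hcong, List.filter_comm]
    apply flatMap_filter_eq
    intro m _ hq
    apply dfsR_nil_of_not_matched
    rw [getLastD_concat']
    exact hq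

-- B's index lookup
theorem getD_pvBuildIdx (rel : List (Int × Int)) (c : Int) :
    (pvBuildIdx rel).getD c [] = (rel.filter (fun p => p.1 == c)).map (fun p => p.2) := by
  unfold pvBuildIdx
  rw [PySem.Dict.getD_foldl_modify_append]
  simp

-- B's DFS over the indexes is the reference DFS
theorem pvDfs_eq_dfsR : ∀ (rels : List (List (Int × Int))) (tup : List Int),
    pvDfs (rels.map pvBuildIdx) tup = dfsR rels tup := by
  intro rels
  induction rels with
  | nil => intro tup; rfl
  | cons r rest ih =>
    intro tup
    simp only [List.map_cons, pvDfs, dfsR, getD_pvBuildIdx, List.flatMap_map]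
    apply List.flatMap_congr
    intro m _
    exact ih (tup ++ [m.2])

-- ===== VERDICT (by name: the statement is the Claim_ definition above) =====
-- the closed assembly of A
theorem solve_eq_dfsR (r0 : List (Int × Int)) (rest : List (List (Int × Int))) :
    solve (r0 :: rest) = r0.flatMap (fun t => dfsR rest [t.1, t.2]) := by
  simp only [solve, List.map_id']
  rw [semiPass_eq]
  simp only [matchedChain, List.headD_cons, List.tail_cons]
  have hfun : (fun (cur : List (List Int)) (rel : List (Int × Int)) =>
      cur.foldl (fun acc tup =>
        if (rel.foldl (fun d p => d.modify p.1 [] (fun l => l ++ [p])) PySem.Dict.empty).contains (tup.getLastD 0) then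
          acc ++ ((rel.foldl (fun d p => d.modify p.1 [] (fun l => l ++ [p])) PySem.Dict.empty).getD (tup.getLastD 0) []).map (fun m => tup ++ [m.2])
        else acc) [])
      = (fun (cur : List (List Int)) (rel : List (Int × Int)) =>
          cur.flatMap (fun tup => (rel.filter (fun p => p.1 == tup.getLastD 0)).map (fun m => tup ++ [m.2]))) :=
    funext fun cur => funext fun rel => inner_eq rel cur
  rw [hfun, foldl_join_eq_dfsR]
  simp only [dfsR_matchedChain, pvPairRow, List.flatMap_map]
  apply flatMap_filter_eq
  intro m _ hq
  apply dfsR_nil_of_not_matched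
  simpa using hq

theorem solve_alt_eq_dfsR (r0 : List (Int × Int)) (rest : List (List (Int × Int))) :
    solve_alt (r0 :: rest) = r0.flatMap (fun t => dfsR rest [t.1, t.2]) := by
  simp only [solve_alt]
  apply List.flatMap_congr
  intro t _
  exact pvDfs_eq_dfsR rest [t.1, t.2]

-- ===== VERDICT =====
theorem solve_spec : Claim_equal_solve := by
  intro relations _ hpre
  unfold Spec_solve
  match relations with
  | [] => exact absurd rfl hpre
  | r0 :: rest => rw [solve_eq_dfsR, solve_alt_eq_dfsR]
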